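-- pv_equiv track=rewrite | github.com/rossirule2012/UserManager | Hasher.py | dehash
-- ===== SOURCE A (Python) =====
-- def dehash(to_dehash):
--     temp=''
--     dehashed=''
--     buffer=[]
--     for char in to_dehash:
--         buffer+=char
--     for i in range(len(buffer)):
--        temp+=buffer[len(buffer)-1-i]
--     for i in range(len(temp)):
--         if i%5==0:
--             dehashed+=(temp[i])
--     return dehashed
-- ===== SOURCE B (Python) =====
-- def dehash(to_dehash):
--     chars = list(to_dehash)
--     out = []
--     i = len(chars) - 1
--     while i >= 0:
--         out.append(chars[i])
--         i -= 5
--     return ''.join(out)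
-- ===== Notes on version B (the rewrite author's own statement) =====
-- stated objective: faster
-- what changed: A builds a char buffer, constructs the full reversed string by repeated concatenation, then filters every 5th position; B walks one backward strided loop (indices len-1, len-6, ...) collecting only the surviving characters and joining once.
import Mathlib
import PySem

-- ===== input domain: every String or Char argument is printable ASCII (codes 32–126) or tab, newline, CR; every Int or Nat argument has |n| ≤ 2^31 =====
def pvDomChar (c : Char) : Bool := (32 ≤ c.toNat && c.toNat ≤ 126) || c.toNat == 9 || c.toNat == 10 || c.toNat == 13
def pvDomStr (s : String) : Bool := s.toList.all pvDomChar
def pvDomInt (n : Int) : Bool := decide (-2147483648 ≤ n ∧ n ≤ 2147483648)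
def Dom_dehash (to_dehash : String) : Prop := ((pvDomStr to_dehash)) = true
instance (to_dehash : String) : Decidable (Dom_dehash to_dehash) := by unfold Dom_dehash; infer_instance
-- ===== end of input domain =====

-- B replaces A's three passes (buffer, full reversal, every-5th filter) by one backward strided
-- loop over the original characters; same return value, objective: simpler.

-- ===== PORT A =====
-- A: buffer += char; temp += buffer[len-1-i]; if i%5==0: dehashed += temp[i].
-- Indices are always in range, so pyGetD's default ' ' is never used.
def dehash (to_dehash : String) : String :=
  let buffer : List Char := to_dehash.toList.foldl (fun b c => b ++ [c]) []
  let temp : List Char := (PySem.List.pyRange 0 (buffer.length : Int) 1).foldl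
      (fun t i => t ++ [PySem.List.pyGetD buffer ((buffer.length : Int) - 1 - i) ' ']) []
  let dehashed : List Char := (PySem.List.pyRange 0 (temp.length : Int) 1).foldl
      (fun d i => if PySem.Int.mod i 5 == 0 then d ++ [PySem.List.pyGetD temp i ' '] else d) []
  String.mk dehashed

-- ===== PORT B =====
-- B's while loop: i = len-1; while i >= 0: out.append(chars[i]); i -= 5
def dehashAltLoop (chars : List Char) (i : Int) : List Char :=
  if h : 0 ≤ i then PySem.List.pyGetD chars i ' ' :: dehashAltLoop chars (i - 5) else []
termination_by (i + 1).toNat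
decreasing_by omega

def dehash_alt (to_dehash : String) : String :=
  let chars : List Char := to_dehash.toList
  String.mk (dehashAltLoop chars ((chars.length : Int) - 1))

-- ===== PRECONDITION & SPEC =====
def Spec_dehash (to_dehash : String) (out : String) : Prop := out = dehash_alt to_dehash
instance (to_dehash : String) (out : String) : Decidable (Spec_dehash to_dehash out) := by unfold Spec_dehash; infer_instance

-- ===== CLAIM (what is proved, stated in full; the proofs are below) =====
def Claim_equal_dehash : Prop := ∀ (to_dehash : String), Dom_dehash to_dehash → Spec_dehash to_dehash (dehash to_dehash)

-- ===== LEMMAS AND PROOFS =====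

-- A's first loop copies the string into the buffer.
lemma buffer_eq (l : List Char) : l.foldl (fun b c => b ++ [c]) [] = l := by
  simpa using PySem.List.foldl_append_singleton_eq_map (fun c => c) l []

-- A's second loop builds the reversal.
lemma temp_eq_reverse (l : List Char) :
    (PySem.List.pyRange 0 (l.length : Int) 1).foldl
      (fun t i => t ++ [PySem.List.pyGetD l ((l.length : Int) - 1 - i) ' ']) []
    = l.reverse := by
  rw [PySem.List.foldl_append_singleton_eq_map, PySem.List.pyRange_zero_natCast, List.map_map,
    List.nil_append]
  apply List.ext_getElem
  · simp
  · intro i h1 h2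
    simp only [List.length_map, List.length_range] at h1
    have hcast : ((l.length : Int) - 1 - (i : Int)) = ((l.length - 1 - i : Nat) : Int) := by omega
    simp only [List.getElem_map, List.getElem_range, Function.comp_apply, hcast,
      PySem.List.pyGetD_natCast, List.getElem_reverse]
    rw [List.getD_eq_getElem l ' ' (by omega)]

-- multiples of 5 below n, as a strided range
lemma filter_mod5 (n : Nat) :
    (List.range n).filter (fun k => decide (k % 5 = 0))
    = (List.range ((n + 4) / 5)).map (fun k => 5 * k) := by
  induction n with
  | zero => simp
  | succ n ih =>
    rw [List.range_succ, List.filter_append, ih]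
    by_cases h : n % 5 = 0
    · have h1 : (n + 1 + 4) / 5 = (n + 4) / 5 + 1 := by omega
      have h2 : 5 * ((n + 4) / 5) = n := by omega
      rw [h1, List.range_succ, List.map_append]
      simp [h, h2]
    · have h1 : (n + 1 + 4) / 5 = (n + 4) / 5 := by omega
      rw [h1]
      simp [h]

-- B's loop, characterised as a map over a counter range
lemma altLoop_eq (l : List Char) (m : Nat) :
    dehashAltLoop l (m : Int)
    = (List.range (m / 5 + 1)).map (fun k => l.getD (m - 5 * k) ' ') := by
  induction m using Nat.strong_induction_on with
  | _ m ih =>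
    rw [dehashAltLoop, dif_pos (by omega : (0:Int) ≤ (m : Int))]
    by_cases h : m < 5
    · rw [dehashAltLoop, dif_neg (by omega : ¬ (0:Int) ≤ (m : Int) - 5)]
      have : m / 5 = 0 := by omega
      simp [this, PySem.List.pyGetD_natCast]
    · have hc : (m : Int) - 5 = ((m - 5 : Nat) : Int) := by omega
      rw [hc, ih (m - 5) (by omega), PySem.List.pyGetD_natCast]
      have h1 : m / 5 + 1 = ((m - 5) / 5 + 1) + 1 := by omega
      conv_rhs => rw [h1, List.range_succ_eq_map, List.map_cons, List.map_map]
      simp only [Nat.mul_zero, Nat.sub_zero]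
      congr 1
      apply List.map_congr_left
      intro k _
      simp only [Function.comp_apply, Nat.succ_eq_add_one]
      congr 1
      omega

-- the two final index maps agree
lemma maps_agree (l : List Char) (hn : 1 ≤ l.length) :
    (List.range ((l.length + 4) / 5)).map (fun k => l.reverse.getD (5 * k) ' ')
    = (List.range ((l.length - 1) / 5 + 1)).map (fun k => l.getD (l.length - 1 - 5 * k) ' ') := by
  have hm : (l.length + 4) / 5 = (l.length - 1) / 5 + 1 := by omega
  rw [hm]
  apply List.map_congr_left
  intro k hk
  rw [List.mem_range] at hk
  have h5 : 5 * k < l.length := by omega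
  rw [List.getD_eq_getElem l.reverse ' ' (by simpa using h5),
    List.getD_eq_getElem l ' ' (by omega), List.getElem_reverse]

-- ===== VERDICT (by name: the statement is the Claim_ definition above) =====
theorem dehash_spec : Claim_equal_dehash := by
  intro s _
  unfold Spec_dehash dehash dehash_alt
  simp only [buffer_eq, temp_eq_reverse]
  set l := s.toList with hl
  simp only [List.length_reverse]
  rw [PySem.List.foldl_append_if (fun i => PySem.Int.mod i 5 == 0)
      (fun i => PySem.List.pyGetD l.reverse i ' ')]
  rw [PySem.List.pyRange_zero_natCast, List.filter_map]
  have hpred : ((fun i => PySem.Int.mod i 5 == 0) ∘ (fun k : Nat => (k : Int)))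
      = (fun k : Nat => decide (k % 5 = 0)) := by
    funext k
    have hf : ((k : Int).fmod 5) = ((k % 5 : Nat) : Int) := by
      rw [Int.fmod_eq_emod]; simp
    simp only [Function.comp_apply, PySem.Int.mod, hf]
    by_cases h : k % 5 = 0 <;> simp [h] <;> omega
  rw [hpred, filter_mod5, List.map_map, List.nil_append]
  by_cases h0 : l.length = 0
  · have hl0 : l = [] := List.eq_nil_of_length_eq_zero h0
    rw [dehashAltLoop, dif_neg (by rw [hl0]; simp)]
    simp [hl0]
  · have hc : (l.length : Int) - 1 = ((l.length - 1 : Nat) : Int) := by omega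
    rw [hc, altLoop_eq, ← maps_agree l (by omega), List.map_map]
    congr 1
    apply List.map_congr_left
    intro k _
    simp only [Function.comp_apply, PySem.List.pyGetD_natCast]
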